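-- pv_equiv track=rewrite | github.com/ShuvalovAnthony/ege | 9/48456/48456.py | check
-- ===== SOURCE A (Python) =====
-- def check(row):
--     povtor = set()
--     nepovtor = []
--     for num in row:
--         if row.count(num) == 1:
--             nepovtor.append(num)
--         elif row.count(num) == 2:
--             povtor.add(num)
--         else:
--             return False
--
--     if (
--         (
--             len(set(row)) == 4
--         ) and
--         (
--             (sum(povtor)) > (sum(nepovtor))
--         )
--     ): return True
--     return False
-- ===== SOURCE B (Python) =====
-- def check(row):
--     s = sorted(row)
--     distinct = 0
--     balance = 0
--     i = 0
--     n = len(s)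
--     while i < n:
--         j = i + 1
--         while j < n and s[j] == s[i]:
--             j += 1
--         run = j - i
--         if run > 2:
--             return False
--         distinct += 1
--         balance += s[i] if run == 2 else -s[i]
--         i = j
--     return distinct == 4 and balance > 0
-- ===== Notes on version B (the rewrite author's own statement) =====
-- stated objective: faster
-- what changed: B sorts the row once and scans adjacent runs with a signed balance accumulator (add value on a pair run, subtract on a singleton run), replacing A's per-element row.count rescans, set/list accumulation and final sum comparison.
import Mathlib
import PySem

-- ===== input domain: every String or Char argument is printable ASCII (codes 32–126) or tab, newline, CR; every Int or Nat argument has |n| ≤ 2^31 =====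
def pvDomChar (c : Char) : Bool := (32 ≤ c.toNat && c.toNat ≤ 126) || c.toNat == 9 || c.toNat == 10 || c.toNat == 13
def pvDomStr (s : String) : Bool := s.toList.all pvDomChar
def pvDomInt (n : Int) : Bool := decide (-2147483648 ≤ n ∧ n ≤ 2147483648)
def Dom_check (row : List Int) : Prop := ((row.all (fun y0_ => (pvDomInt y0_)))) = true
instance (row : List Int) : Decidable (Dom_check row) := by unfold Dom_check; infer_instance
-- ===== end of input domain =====

-- B sorts the row once and scans adjacent runs with a signed balance accumulator instead of
-- A's per-element row.count rescans and final sum comparison (objective: faster).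

-- ===== PORT A =====
-- A's for-loop with early 'return False', then the final combined condition.
def checkGo (row rest : List Int) (povtor : PySem.Set Int) (nepovtor : List Int) : Bool :=
  match rest with
  | [] => decide ((PySem.Set.ofList row).length = 4 ∧ nepovtor.sum < povtor.sum)
  | num :: t =>
    if PySem.List.count row num = 1 then checkGo row t povtor (nepovtor ++ [num])
    else if PySem.List.count row num = 2 then checkGo row t (PySem.Set.add povtor num) nepovtor
    else false

def check (row : List Int) : Bool := checkGo row row PySem.Set.empty []

-- ===== PORT B =====
-- B's outer while over the sorted suffix; the inner while advancing j over the run of equal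
-- elements is the takeWhile/dropWhile split of the suffix.
def checkAltGo (s : List Int) (distinct balance : Int) : Bool :=
  match s with
  | [] => decide (distinct = 4 ∧ 0 < balance)
  | x :: t =>
    let run : Int := 1 + (t.takeWhile (fun y => y == x)).length
    if 2 < run then false
    else checkAltGo (t.dropWhile (fun y => y == x)) (distinct + 1)
           (balance + (if run == 2 then x else -x))
termination_by s.length
decreasing_by
  simpa using Nat.lt_succ_of_le (List.length_dropWhile_le (fun y => y == x) t)

def check_alt (row : List Int) : Bool :=
  checkAltGo (PySem.List.sorted row (fun x => x) false) 0 0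

-- ===== PRECONDITION & SPEC =====
def Spec_check (row : List Int) (out : Bool) : Prop := out = check_alt row
instance (row : List Int) (out : Bool) : Decidable (Spec_check row out) := by unfold Spec_check; infer_instance

-- ===== CLAIM (what is proved, stated in full; the proofs are below) =====
def Claim_equal_check : Prop := ∀ (row : List Int), Dom_check row → Spec_check row (check row)

-- ===== LEMMAS AND PROOFS =====

-- If some remaining element has count other than 1 or 2, A's loop returns False.
theorem checkGo_false (row : List Int) (rest : List Int) (pov : PySem.Set Int) (nep : List Int)
    (h : ∃ x ∈ rest, List.count x row ≠ 1 ∧ List.count x row ≠ 2) :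
    checkGo row rest pov nep = false := by
  induction rest generalizing pov nep with
  | nil => simp at h
  | cons a t ih =>
    obtain ⟨x, hx, h1, h2⟩ := h
    simp only [checkGo, PySem.List.count_eq]
    rcases List.mem_cons.mp hx with rfl | hxt
    · rw [if_neg h1, if_neg h2]
    · split_ifs <;> first | exact ih _ _ ⟨x, hxt, h1, h2⟩ | rfl

-- If every remaining element has count 1 or 2, A's loop accumulates the two filters.
theorem checkGo_ok (row : List Int) (rest : List Int) (pov : PySem.Set Int) (nep : List Int)
    (h : ∀ x ∈ rest, List.count x row = 1 ∨ List.count x row = 2) :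
    checkGo row rest pov nep =
      decide ((PySem.Set.ofList row).length = 4 ∧
        (nep ++ rest.filter (fun x => List.count x row == 1)).sum <
        (PySem.Set.update pov (rest.filter (fun x => List.count x row == 2))).sum) := by
  induction rest generalizing pov nep with
  | nil => simp [checkGo, PySem.Set.update]
  | cons a t ih =>
    have ha := h a (by simp)
    simp only [checkGo, PySem.List.count_eq]
    rcases ha with h1 | h2
    · rw [if_pos h1, ih _ _ (fun x hx => h x (List.mem_cons_of_mem _ hx))]
      have hne2 : List.count a row ≠ 2 := by omega
      simp only [List.filter_cons, h1, hne2, beq_iff_eq]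
      simp [PySem.Set.update]
    · have hne : List.count a row ≠ 1 := by omega
      rw [if_neg hne, if_pos h2, ih _ _ (fun x hx => h x (List.mem_cons_of_mem _ hx))]
      simp only [List.filter_cons, h2, hne, beq_iff_eq]
      simp [PySem.Set.update]

-- Set.ofList commutes with filter.
theorem ofList_filter (p : Int → Bool) (xs : List Int) :
    PySem.Set.ofList (xs.filter p) = (PySem.Set.ofList xs).filter p := by
  have key : ∀ (xs s : List Int), (xs.filter p).foldl PySem.Set.add (s.filter p)
      = (xs.foldl PySem.Set.add s).filter p := by
    intro xs
    induction xs with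
    | nil => intro s; simp
    | cons a t ih =>
      intro s
      by_cases hp : p a
      · have hstep : (PySem.Set.add s a).filter p = PySem.Set.add (s.filter p) a := by
          simp only [PySem.Set.add, PySem.Set.contains]
          by_cases hm : a ∈ s
          · simp [hm, List.mem_filter, hp]
          · simp [hm, List.mem_filter, List.filter_append, hp]
        simp only [List.filter_cons, hp, if_pos, List.foldl_cons]
        rw [← hstep, ih]
      · simp only [List.filter_cons, hp, List.foldl_cons]
        have hstep : (PySem.Set.add s a).filter p = s.filter p := by
          simp only [PySem.Set.add, PySem.Set.contains]
          by_cases hm : a ∈ s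
          · simp [hm]
          · simp [hm, List.filter_append, hp]
        simp only [Bool.false_eq_true, if_false]
        rw [← hstep, ih]
  have h := key xs []
  simpa [PySem.Set.ofList_eq_foldl] using h

-- The count-1 elements of a row form a duplicate-free list.
theorem nodup_filter_count_one (row : List Int) :
    (row.filter (fun x => List.count x row == 1)).Nodup := by
  rw [List.nodup_iff_count_le_one]
  intro a
  rcases Nat.lt_or_ge (List.count a (row.filter (fun x => List.count x row == 1))) 1 with h | h
  · omega
  · have hmem : a ∈ row.filter (fun x => List.count x row == 1) :=
      List.count_pos_iff.mp (by omega)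
    have h1 : List.count a row = 1 := by simpa using List.of_mem_filter hmem
    calc List.count a (row.filter (fun x => List.count x row == 1))
        ≤ List.count a row := List.Sublist.count_le a List.filter_sublist
      _ = 1 := h1

theorem takeWhile_eq_filter_of_sorted (x : Int) (t : List Int)
    (h : (x :: t).Pairwise (· ≤ ·)) :
    t.takeWhile (fun y => y == x) = t.filter (fun y => y == x) ∧
    t.dropWhile (fun y => y == x) = t.filter (fun y => !(y == x)) := by
  induction t with
  | nil => simp
  | cons a t' ih =>
    by_cases hax : a = x
    · subst hax
      have h' : (a :: t').Pairwise (· ≤ ·) := (List.pairwise_cons.mp h).2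
      obtain ⟨h1, h2⟩ := ih h'
      simp [h1, h2]
    · have hxa : x < a := by
        have := (List.pairwise_cons.mp h).1 a (by simp)
        omega
      have hall : ∀ y ∈ a :: t', x < y := by
        intro y hy
        rcases List.mem_cons.mp hy with rfl | hy'
        · exact hxa
        · have h' : (a :: t').Pairwise (· ≤ ·) := (List.pairwise_cons.mp h).2
          have := (List.pairwise_cons.mp h').1 y hy'
          omega
      constructor
      · rw [List.takeWhile_cons_of_neg (by simp [hax])]
        symm
        rw [List.filter_eq_nil_iff]
        intro y hy
        have := hall y hy
        simp; omega
      · rw [List.dropWhile_cons_of_neg (by simp [hax])]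
        symm
        rw [List.filter_eq_self]
        intro y hy
        have := hall y hy
        simp; omega

theorem checkAltGo_spec (n : Nat) : ∀ (s : List Int), s.length ≤ n → s.Pairwise (· ≤ ·) →
    ∀ (d b : Int),
    checkAltGo s d b =
      if s.any (fun x => decide (2 < List.count x s)) then false
      else decide (d + ((PySem.Set.ofList s).length : Int) = 4 ∧
        0 < b + ((PySem.Set.ofList s).map
          (fun x => if List.count x s = 2 then x else -x)).sum) := by
  induction n with
  | zero =>
    intro s hs _ d b
    have : s = [] := List.length_eq_zero_iff.mp (Nat.le_zero.mp hs)
    subst this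
    simp [checkAltGo]
  | succ n ih =>
    intro s hs hsort d b
    match s with
    | [] => simp [checkAltGo]
    | x :: t =>
      obtain ⟨htw, hdw⟩ := takeWhile_eq_filter_of_sorted x t hsort
      have hcx : List.count x (x :: t) = 1 + (t.takeWhile (fun y => y == x)).length := by
        rw [htw, List.count_cons_self, List.count_eq_length_filter]
        · omega
      have hxnr : x ∉ t.filter (fun y => !(y == x)) := by
        intro hm
        have := List.of_mem_filter hm
        simp at this
      have hrcount : ∀ y ∈ t.filter (fun y => !(y == x)), List.count y (t.filter (fun y => !(y == x))) = List.count y (x :: t) := by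
        intro y hy
        have hyx : y ≠ x := by
          rintro rfl; exact hxnr hy
        rw [List.count_filter (by simp [hyx])]
        simp [List.count_cons, hyx]
        omega
      have hmem : ∀ y, y ∈ x :: t ↔ y = x ∨ y ∈ t.filter (fun y => !(y == x)) := by
        intro y
        constructor
        · intro hy
          rcases List.mem_cons.mp hy with rfl | hyt
          · exact Or.inl rfl
          · by_cases hyx : y = x
            · exact Or.inl hyx
            · refine Or.inr ?_
              exact List.mem_filter.mpr ⟨hyt, by simp [hyx]⟩
        · rintro (rfl | hy)
          · simp
          · exact List.mem_cons_of_mem _ (List.mem_filter.mp hy).1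
      have hperm : (PySem.Set.ofList (x :: t)).Perm (x :: PySem.Set.ofList (t.filter (fun y => !(y == x)))) := by
        rw [List.perm_ext_iff_of_nodup (PySem.Set.nodup_ofList _)
          (List.nodup_cons.mpr ⟨by simpa using hxnr, PySem.Set.nodup_ofList _⟩)]
        intro y
        rw [PySem.Set.mem_ofList, hmem y, List.mem_cons, PySem.Set.mem_ofList]
      have hrsorted : (t.filter (fun y => !(y == x))).Pairwise (· ≤ ·) := by
        exact ((List.pairwise_cons.mp hsort).2).filter _
      have hrlen : (t.filter (fun y => !(y == x))).length ≤ n := by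
        have := List.length_filter_le (fun y => !(y == x)) t
        have ht : t.length ≤ n := by simpa using hs
        omega
      rw [checkAltGo]
      simp only [hdw]
      by_cases hbig : 2 < (1 + ((t.takeWhile (fun y => y == x)).length : Int))
      · rw [if_pos hbig]
        have : (x :: t).any (fun y => decide (2 < List.count y (x :: t))) = true := by
          refine List.any_eq_true.mpr ⟨x, by simp, ?_⟩
          simp only [decide_eq_true_eq]
          omega
        rw [this]
        simp
      · rw [if_neg hbig]
        have hcx2 : List.count x (x :: t) ≤ 2 := by omega
        rw [ih _ hrlen hrsorted]
        have hany : ((x :: t).any (fun y => decide (2 < List.count y (x :: t))))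
            = ((t.filter (fun y => !(y == x))).any (fun y => decide (2 < List.count y (t.filter (fun y => !(y == x)))))) := by
          by_cases hra : (t.filter (fun y => !(y == x))).any (fun y => decide (2 < List.count y (t.filter (fun y => !(y == x))))) = true
          · obtain ⟨y, hy, hyc⟩ := List.any_eq_true.mp hra
            rw [hra]
            refine List.any_eq_true.mpr ⟨y, (hmem y).mpr (Or.inr hy), ?_⟩
            rw [← hrcount y hy]; exact hyc
          · rw [Bool.not_eq_true] at hra
            rw [hra, List.any_eq_false]
            intro y hy
            rcases (hmem y).mp hy with rfl | hyr
            · simp only [decide_eq_true_eq]; omega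
            · have := List.any_eq_false.mp hra y hyr
              rw [hrcount y hyr] at this
              exact this
        rw [hany]
        by_cases hra : (t.filter (fun y => !(y == x))).any (fun y => decide (2 < List.count y (t.filter (fun y => !(y == x))))) = true
        · rw [hra]
          simp
        · rw [Bool.not_eq_true] at hra
          rw [hra]
          simp only [Bool.false_eq_true, if_false]
          have hlen : (PySem.Set.ofList (x :: t)).length = 1 + (PySem.Set.ofList (t.filter (fun y => !(y == x)))).length := by
            rw [hperm.length_eq]; simp; omega
          have hsum : ((PySem.Set.ofList (x :: t)).map
              (fun y => if List.count y (x :: t) = 2 then y else -y)).sum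
              = (if List.count x (x :: t) = 2 then x else -x) +
                ((PySem.Set.ofList (t.filter (fun y => !(y == x)))).map (fun y => if List.count y (t.filter (fun y => !(y == x))) = 2 then y else -y)).sum := by
            rw [(hperm.map _).sum_eq]
            simp only [List.map_cons, List.sum_cons]
            congr 1
            apply congrArg
            apply List.map_congr_left
            intro y hy
            rw [hrcount y (by simpa using hy)]
          have hifx : (if (1 + ((t.takeWhile (fun y => y == x)).length : Int)) == 2 then x else -x)
              = (if List.count x (x :: t) = 2 then x else -x) := by
            by_cases h2 : List.count x (x :: t) = 2
            · rw [if_pos h2, if_pos (by simp; omega)]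
            · rw [if_neg h2, if_neg (by simp; omega)]
          rw [decide_eq_decide]
          rw [hlen, hsum, hifx]
          constructor
          · rintro ⟨h1, h2⟩
            constructor
            · push_cast at h1 ⊢; omega
            · linarith
          · rintro ⟨h1, h2⟩
            constructor
            · push_cast at h1 ⊢; omega
            · linarith

-- Splitting the signed sum over distinct elements whose counts are 1 or 2.
theorem sum_if_split (c : Int → Nat) (l : List Int) (h : ∀ y ∈ l, c y = 1 ∨ c y = 2) :
    (l.map (fun y => if c y = 2 then y else -y)).sum
      = (l.filter (fun y => c y == 2)).sum - (l.filter (fun y => c y == 1)).sum := by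
  induction l with
  | nil => simp
  | cons a t ih =>
    have ha := h a (by simp)
    have ih' := ih (fun y hy => h y (List.mem_cons_of_mem _ hy))
    rcases ha with h1 | h2
    · have hne : c a ≠ 2 := by omega
      simp only [List.map_cons, List.sum_cons, List.filter_cons, beq_iff_eq, h1, hne,
        if_neg hne, ih']
      simp
      ring
    · simp only [List.map_cons, List.sum_cons, List.filter_cons, beq_iff_eq, h2,
        if_pos rfl, ih']
      simp
      ring

-- ===== VERDICT (by name: the statement is the Claim_ definition above) =====
theorem check_spec : Claim_equal_check := by
  intro row _
  unfold Spec_check check_alt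
  have hsort : (PySem.List.sorted row (fun x => x) false).Pairwise (· ≤ ·) := by
    simpa using PySem.List.sorted_pairwise (xs := row) (key := fun x => x)
  have hperm : (PySem.List.sorted row (fun x => x) false).Perm row :=
    PySem.List.sorted_perm ..
  have hcount : ∀ y, List.count y (PySem.List.sorted row (fun x => x) false)
      = List.count y row := fun y => hperm.count_eq y
  rw [checkAltGo_spec (PySem.List.sorted row (fun x => x) false).length _ le_rfl hsort 0 0]
  by_cases hbad : ∃ x ∈ row, List.count x row ≠ 1 ∧ List.count x row ≠ 2
  · obtain ⟨x, hx, h1, h2⟩ := hbad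
    have hc : 1 ≤ List.count x row := List.count_pos_iff.mpr hx
    have hany : ((PySem.List.sorted row (fun x => x) false).any
        (fun y => decide (2 < List.count y (PySem.List.sorted row (fun x => x) false)))) = true := by
      refine List.any_eq_true.mpr ⟨x, hperm.mem_iff.mpr hx, ?_⟩
      rw [hcount x]
      simp only [decide_eq_true_eq]
      omega
    rw [hany, if_pos rfl,
      show check row = false from checkGo_false row row _ _ ⟨x, hx, h1, h2⟩]
  · push_neg at hbad
    have hgood : ∀ x ∈ row, List.count x row = 1 ∨ List.count x row = 2 := by
      intro x hx
      by_cases h : List.count x row = 1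
      · exact Or.inl h
      · exact Or.inr (hbad x hx h)
    have hany : ((PySem.List.sorted row (fun x => x) false).any
        (fun y => decide (2 < List.count y (PySem.List.sorted row (fun x => x) false)))) = false := by
      rw [List.any_eq_false]
      intro y hy
      rw [hcount y]
      rcases hgood y (hperm.mem_iff.mp hy) with h | h <;> (simp; omega)
    rw [hany]
    simp only [Bool.false_eq_true, if_false]
    -- A's loop in the all-good case
    have hA := checkGo_ok row row PySem.Set.empty [] hgood
    have hpov : PySem.Set.update PySem.Set.empty
        (row.filter (fun x => List.count x row == 2))
        = (PySem.Set.ofList row).filter (fun x => List.count x row == 2) := by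
      rw [PySem.Set.update_empty, ofList_filter]
    have hnep : row.filter (fun x => List.count x row == 1)
        = (PySem.Set.ofList row).filter (fun x => List.count x row == 1) := by
      rw [← ofList_filter]
      exact (PySem.Set.ofList_eq_self_of_nodup _ (nodup_filter_count_one row)).symm
    rw [show check row = checkGo row row PySem.Set.empty [] from rfl, hA, hpov,
      List.nil_append, hnep]
    -- transfer the set of distinct elements from the sorted list back to row
    have hsetperm : (PySem.Set.ofList (PySem.List.sorted row (fun x => x) false)).Perm
        (PySem.Set.ofList row) := by
      rw [List.perm_ext_iff_of_nodup (PySem.Set.nodup_ofList _) (PySem.Set.nodup_ofList _)]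
      intro y
      simp only [PySem.Set.mem_ofList]
      exact hperm.mem_iff
    have hlen : (PySem.Set.ofList (PySem.List.sorted row (fun x => x) false)).length
        = (PySem.Set.ofList row).length := hsetperm.length_eq
    have hsum : ((PySem.Set.ofList (PySem.List.sorted row (fun x => x) false)).map
        (fun y => if List.count y (PySem.List.sorted row (fun x => x) false) = 2 then y else -y)).sum
        = ((PySem.Set.ofList row).map (fun y => if List.count y row = 2 then y else -y)).sum := by
      rw [show ((PySem.Set.ofList (PySem.List.sorted row (fun x => x) false)).map
          (fun y => if List.count y (PySem.List.sorted row (fun x => x) false) = 2 then y else -y))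
        = ((PySem.Set.ofList (PySem.List.sorted row (fun x => x) false)).map
          (fun y => if List.count y row = 2 then y else -y)) from
        List.map_congr_left (fun y _ => by rw [hcount y])]
      exact ((hsetperm.map _).sum_eq)
    rw [hsum, hlen]
    rw [sum_if_split (fun y => List.count y row) _
      (fun y hy => hgood y (by rwa [PySem.Set.mem_ofList] at hy))]
    rw [decide_eq_decide]
    constructor
    · rintro ⟨h1, h2⟩
      exact ⟨by push_cast; omega, by omega⟩
    · rintro ⟨h1, h2⟩
      exact ⟨by push_cast at h1; omega, by omega⟩
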